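-- pv_equiv track=rewrite | github.com/Dacosmicgiant/jobhunt-cli | jobhunt/sources/naukri.py | _parse_placeholders
-- ===== SOURCE A (Python) =====
-- def _parse_placeholders(placeholders: list) -> dict:
--     """Extract experience, salary, location from placeholders list."""
--     result = {"experience": "", "salary": "", "location": ""}
--     for p in placeholders:
--         t = p.get("type", "")
--         label = p.get("label", "")
--         if t == "experience":
--             result["experience"] = label
--         elif t == "salary":
--             result["salary"] = label
--         elif t == "location":
--             result["location"] = label
--     return result
-- ===== SOURCE B (Python) =====
-- def _parse_placeholders(placeholders: list) -> dict:
--     """Extract experience, salary, location from placeholders list."""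
--     def find(t):
--         for p in reversed(placeholders):
--             if p.get("type", "") == t:
--                 return p.get("label", "")
--         return ""
--     return {k: find(k) for k in ("experience", "salary", "location")}
-- ===== Notes on version B (the rewrite author's own statement) =====
-- stated objective: alternative
-- what changed: Replaces A's single forward accumulating pass (mutable result dict updated by a three-way if/elif) with three independent backwards searches: for each fixed key, scan reversed(placeholders) and return the first matching label (first-in-reverse = last-occurrence-wins), with no accumulator at all.
import Mathlib
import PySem

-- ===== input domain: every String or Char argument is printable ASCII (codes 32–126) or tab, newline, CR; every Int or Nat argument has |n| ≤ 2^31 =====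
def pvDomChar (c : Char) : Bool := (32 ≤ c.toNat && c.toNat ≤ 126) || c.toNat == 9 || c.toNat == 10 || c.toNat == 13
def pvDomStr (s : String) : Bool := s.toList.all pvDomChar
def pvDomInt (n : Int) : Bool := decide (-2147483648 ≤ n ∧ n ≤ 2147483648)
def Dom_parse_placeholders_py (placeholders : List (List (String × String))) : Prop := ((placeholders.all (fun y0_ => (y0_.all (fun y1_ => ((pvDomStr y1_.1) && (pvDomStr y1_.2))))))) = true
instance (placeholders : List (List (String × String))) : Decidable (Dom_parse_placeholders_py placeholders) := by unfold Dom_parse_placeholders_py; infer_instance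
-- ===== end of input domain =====

-- B replaces A's single forward accumulating pass with three independent backwards first-match searches (no accumulator); objective: alternative.

-- ===== PORT A =====
def parse_placeholders_py (placeholders : List (List (String × String))) : List (String × String) :=
  (placeholders.foldl (fun result p =>
    let t := (PySem.Dict.ofList p).getD "type" ""
    let label := (PySem.Dict.ofList p).getD "label" ""
    if t = "experience" then result.insert "experience" label
    else if t = "salary" then result.insert "salary" label
    else if t = "location" then result.insert "location" label
    else result)
    (PySem.Dict.ofList [("experience", ""), ("salary", ""), ("location", "")])).items

-- ===== PORT B =====
/-- B's inner `find`: scan the (already reversed) list, return the first matching label, else "". -/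
def pvFindB (t : String) : List (List (String × String)) → String
  | [] => ""
  | p :: rest =>
    if (PySem.Dict.ofList p).getD "type" "" = t then (PySem.Dict.ofList p).getD "label" ""
    else pvFindB t rest

def parse_placeholders_py_alt (placeholders : List (List (String × String))) : List (String × String) :=
  (["experience", "salary", "location"].foldl (fun acc k =>
    acc.insert k (pvFindB k placeholders.reverse)) PySem.Dict.empty).items

-- ===== PRECONDITION & SPEC =====
def Spec_parse_placeholders_py (placeholders : List (List (String × String))) (out : List (String × String)) : Prop := out = parse_placeholders_py_alt placeholders
instance (placeholders : List (List (String × String))) (out : List (String × String)) : Decidable (Spec_parse_placeholders_py placeholders out) := by unfold Spec_parse_placeholders_py; infer_instance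

-- ===== CLAIM (what is proved, stated in full; the proofs are below) =====
def Claim_equal_parse_placeholders_py : Prop := ∀ (placeholders : List (List (String × String))), Dom_parse_placeholders_py placeholders → Spec_parse_placeholders_py placeholders (parse_placeholders_py placeholders)

-- ===== LEMMAS AND PROOFS =====

/-- Lookup in one placeholder entry. -/
def pvGet (p : List (String × String)) (k dflt : String) : String :=
  (PySem.Dict.ofList p).getD k dflt

/-- Last label among `ps` whose type equals `k`, starting from default `d`. -/
def pvLast (k : String) (d : String) (ps : List (List (String × String))) : String :=
  ps.foldl (fun acc p => if pvGet p "type" "" = k then pvGet p "label" "" else acc) d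

theorem pvA_fold (ps : List (List (String × String))) :
    ∀ (e s l : String),
      ps.foldl (fun result p =>
        let t := (PySem.Dict.ofList p).getD "type" ""
        let label := (PySem.Dict.ofList p).getD "label" ""
        if t = "experience" then result.insert "experience" label
        else if t = "salary" then result.insert "salary" label
        else if t = "location" then result.insert "location" label
        else result)
        (PySem.Dict.ofList [("experience", e), ("salary", s), ("location", l)])
      = PySem.Dict.ofList [("experience", pvLast "experience" e ps),
                           ("salary", pvLast "salary" s ps),
                           ("location", pvLast "location" l ps)] := by
  induction ps with
  | nil => intro e s l; simp [pvLast]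
  | cons p ps ih =>
    intro e s l
    simp only [List.foldl_cons, pvLast, pvGet]
    by_cases h1 : (PySem.Dict.ofList p).getD "type" "" = "experience"
    · rw [show (PySem.Dict.ofList [("experience", e), ("salary", s), ("location", l)]).insert
            "experience" ((PySem.Dict.ofList p).getD "label" "") =
          PySem.Dict.ofList [("experience", (PySem.Dict.ofList p).getD "label" ""),
            ("salary", s), ("location", l)] by
        simp [PySem.Dict.ofList, PySem.Dict.insert, PySem.Dict.empty, PySem.Dict.update,
              PySem.Dict.contains]]
      rw [if_pos h1]
      simpa [pvLast, pvGet, h1] using ih ((PySem.Dict.ofList p).getD "label" "") s l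
    · by_cases h2 : (PySem.Dict.ofList p).getD "type" "" = "salary"
      · rw [if_neg h1, if_pos h2,
            show (PySem.Dict.ofList [("experience", e), ("salary", s), ("location", l)]).insert
              "salary" ((PySem.Dict.ofList p).getD "label" "") =
            PySem.Dict.ofList [("experience", e),
              ("salary", (PySem.Dict.ofList p).getD "label" ""), ("location", l)] by
          simp [PySem.Dict.ofList, PySem.Dict.insert, PySem.Dict.empty, PySem.Dict.update,
                PySem.Dict.contains]]
        simpa [pvLast, pvGet, h1, h2] using ih e ((PySem.Dict.ofList p).getD "label" "") l
      · by_cases h3 : (PySem.Dict.ofList p).getD "type" "" = "location"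
        · rw [if_neg h1, if_neg h2, if_pos h3,
              show (PySem.Dict.ofList [("experience", e), ("salary", s), ("location", l)]).insert
                "location" ((PySem.Dict.ofList p).getD "label" "") =
              PySem.Dict.ofList [("experience", e), ("salary", s),
                ("location", (PySem.Dict.ofList p).getD "label" "")] by
            simp [PySem.Dict.ofList, PySem.Dict.insert, PySem.Dict.empty, PySem.Dict.update,
                  PySem.Dict.contains]]
          simpa [pvLast, pvGet, h1, h2, h3] using ih e s ((PySem.Dict.ofList p).getD "label" "")
        · rw [if_neg h1, if_neg h2, if_neg h3]
          simpa [pvLast, pvGet, h1, h2, h3] using ih e s l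

/-- `pvFindB` generalized with an explicit default for the empty case. -/
def pvFindD (t d : String) : List (List (String × String)) → String
  | [] => d
  | p :: rest =>
    if (PySem.Dict.ofList p).getD "type" "" = t then (PySem.Dict.ofList p).getD "label" ""
    else pvFindD t d rest

theorem pvFindB_eq (t : String) (l : List (List (String × String))) :
    pvFindB t l = pvFindD t "" l := by
  induction l with
  | nil => rfl
  | cons p rest ih => simp [pvFindB, pvFindD, ih]

theorem pvFindD_append (t d : String) (xs ys : List (List (String × String))) :
    pvFindD t d (xs ++ ys) = pvFindD t (pvFindD t d ys) xs := by
  induction xs with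
  | nil => rfl
  | cons p rest ih => simp [pvFindD, ih]

theorem pvFind_reverse (t : String) (ps : List (List (String × String))) :
    ∀ d, pvFindD t d ps.reverse = pvLast t d ps := by
  induction ps with
  | nil => intro d; rfl
  | cons p ps ih =>
    intro d
    rw [List.reverse_cons, pvFindD_append, ih]
    simp [pvFindD, pvLast, pvGet]

-- ===== VERDICT (by name: the statement is the Claim_ definition above) =====
theorem parse_placeholders_py_spec : Claim_equal_parse_placeholders_py := by
  intro ps _
  show parse_placeholders_py ps = parse_placeholders_py_alt ps
  rw [parse_placeholders_py, parse_placeholders_py_alt, pvA_fold]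
  simp only [List.foldl_cons, List.foldl_nil, pvFindB_eq, pvFind_reverse]
  simp [PySem.Dict.ofList, PySem.Dict.insert, PySem.Dict.empty, PySem.Dict.update,
        PySem.Dict.contains]
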